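-- pv_equiv track=rewrite | github.com/lvchen727/149mer-paper | seq_generator.py | is_max_4pys
-- ===== SOURCE A (Python) =====
-- pyrimidines = ['C','T']
--
-- def is_max_4pys(s):
--     if len(s) <= 4:
--         return True
--     count = 0
--     for i in range(len(s)):
--         if s[i] in pyrimidines:
--             count += 1
--         else:
--             count = 0
--         if count > 4:
--             return False
--     return True
-- ===== SOURCE B (Python) =====
-- import re
--
-- def is_max_4pys(s):
--     return re.search(r'[CT]{5,}', s) is None
-- ===== Notes on version B (the rewrite author's own statement) =====
-- stated objective: idiomatic
-- what changed: Replaces the manual per-character run-counter loop with a single regex search for a run of 5+ pyrimidines ([CT]{5,}); no match means the max run is at most 4.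
import Mathlib
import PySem

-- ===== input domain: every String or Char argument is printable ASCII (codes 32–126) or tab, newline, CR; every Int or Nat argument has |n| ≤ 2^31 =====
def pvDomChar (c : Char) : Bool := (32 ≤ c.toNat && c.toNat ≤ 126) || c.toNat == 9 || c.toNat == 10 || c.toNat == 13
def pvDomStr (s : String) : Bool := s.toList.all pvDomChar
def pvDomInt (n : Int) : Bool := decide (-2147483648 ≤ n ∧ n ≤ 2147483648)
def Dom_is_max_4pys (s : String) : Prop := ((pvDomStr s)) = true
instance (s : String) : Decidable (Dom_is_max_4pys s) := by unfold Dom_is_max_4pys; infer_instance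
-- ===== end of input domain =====

-- B replaces A's manual run-counter loop with a regex-style search for a run of ≥5 pyrimidines (idiomatic; same cost).

-- ===== PORT A =====
def pyrimidines : List Char := ['C', 'T']

-- the for-loop over range(len(s)) with the running `count`, early return on count > 4
def is_max_4pys_loop : List Char → Nat → Bool
  | [], _ => true
  | c :: rest, count =>
    let count' := if c ∈ pyrimidines then count + 1 else 0
    if count' > 4 then false else is_max_4pys_loop rest count'

def is_max_4pys (s : String) : Bool :=
  if s.toList.length ≤ 4 then true
  else is_max_4pys_loop s.toList 0

-- ===== PORT B =====
-- regex [CT]{n} anchored at the head of the list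
def startsPyRun : List Char → Nat → Bool
  | _, 0 => true
  | [], _ + 1 => false
  | c :: rest, n + 1 => if c ∈ pyrimidines then startsPyRun rest n else false

-- re.search: try the match at every position
def hasPyRun5 : List Char → Bool
  | [] => false
  | c :: rest => startsPyRun (c :: rest) 5 || hasPyRun5 rest

def is_max_4pys_alt (s : String) : Bool := !hasPyRun5 s.toList

-- ===== PRECONDITION & SPEC =====
def Spec_is_max_4pys (s : String) (out : Bool) : Prop := out = is_max_4pys_alt s
instance (s : String) (out : Bool) : Decidable (Spec_is_max_4pys s out) := by unfold Spec_is_max_4pys; infer_instance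

-- ===== CLAIM (what is proved, stated in full; the proofs are below) =====
def Claim_equal_is_max_4pys : Prop := ∀ (s : String), Dom_is_max_4pys s → Spec_is_max_4pys s (is_max_4pys s)

-- ===== LEMMAS AND PROOFS =====

theorem startsPyRun_mono (l : List Char) (m n : Nat) (h : m ≤ n)
    (hn : startsPyRun l n = true) : startsPyRun l m = true := by
  induction l generalizing m n with
  | nil =>
    cases m with
    | zero => rfl
    | succ m => cases n with
      | zero => omega
      | succ n => simp [startsPyRun] at hn
  | cons c rest ih =>
    cases m with
    | zero => rfl
    | succ m => cases n with
      | zero => omega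
      | succ n =>
        by_cases hc : c ∈ pyrimidines
        · simp only [startsPyRun, if_pos hc] at hn ⊢
          exact ih m n (by omega) hn
        · simp [startsPyRun, hc] at hn
  
theorem startsPyRun_len (l : List Char) (n : Nat) (h : startsPyRun l n = true) :
    n ≤ l.length := by
  induction l generalizing n with
  | nil => cases n with
    | zero => simp
    | succ n => simp [startsPyRun] at h
  | cons c rest ih =>
    cases n with
    | zero => simp
    | succ n =>
      by_cases hc : c ∈ pyrimidines
      · simp only [startsPyRun, if_pos hc] at h
        have := ih n h
        simp; omega
      · simp [startsPyRun, hc] at h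

theorem hasPyRun5_of_starts (l : List Char) (h : startsPyRun l 5 = true) :
    hasPyRun5 l = true := by
  cases l with
  | nil => simp [startsPyRun] at h
  | cons c rest => simp [hasPyRun5, h]

theorem hasPyRun5_short (l : List Char) (h : l.length ≤ 4) : hasPyRun5 l = false := by
  induction l with
  | nil => rfl
  | cons c rest ih =>
    have h1 : startsPyRun (c :: rest) 5 = false := by
      cases hs : startsPyRun (c :: rest) 5 with
      | false => rfl
      | true =>
        have := startsPyRun_len _ _ hs
        simp at h this; omega
    have h2 : rest.length ≤ 4 := by simp at h; omega
    simp [hasPyRun5, h1, ih h2]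

-- invariant of A's loop: with `count` pyrimidines already seen just before `l`,
-- the loop returns false iff l closes that run to 5 at its head or contains a run of 5 itself
theorem loop_inv (l : List Char) (count : Nat) (h : count ≤ 4) :
    is_max_4pys_loop l count = !(startsPyRun l (5 - count) || hasPyRun5 l) := by
  induction l generalizing count with
  | nil =>
    have : 5 - count = (4 - count) + 1 := by omega
    simp [is_max_4pys_loop, hasPyRun5, this, startsPyRun]
  | cons c rest ih =>
    simp only [is_max_4pys_loop]
    by_cases hc : c ∈ pyrimidines
    · rw [if_pos hc]
      by_cases h4 : count = 4
      · subst h4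
        rw [if_pos (by omega)]
        have hs1 : startsPyRun (c :: rest) (5 - 4) = true := by
          simp [startsPyRun, hc]
        simp [hs1]
      · rw [if_neg (by omega)]
        rw [ih (count + 1) (by omega)]
        have hr : 5 - (count + 1) = 4 - count := by omega
        rw [hr]
        have h5 : 5 - count = (4 - count) + 1 := by omega
        have h5' : startsPyRun (c :: rest) (5 - count) = startsPyRun rest (4 - count) := by
          rw [h5]; simp only [startsPyRun, if_pos hc]
        have hh : hasPyRun5 (c :: rest) = (startsPyRun rest 4 || hasPyRun5 rest) := by
          simp only [hasPyRun5, startsPyRun, if_pos hc]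
        rw [h5', hh]
        cases hs4 : startsPyRun rest 4 with
        | false => simp
        | true =>
          have := startsPyRun_mono rest (4 - count) 4 (by omega) hs4
          simp [this]
    · rw [if_neg hc, if_neg (by omega)]
      rw [ih 0 (by omega)]
      have hhd : startsPyRun (c :: rest) (5 - count) = false := by
        have h5 : 5 - count = (4 - count) + 1 := by omega
        rw [h5]; simp [startsPyRun, hc]
      have hh : hasPyRun5 (c :: rest) = hasPyRun5 rest := by
        simp [hasPyRun5, startsPyRun, hc]
      rw [hh, hhd]
      cases hs : startsPyRun rest 5 with
      | false => simp
      | true => simp [hasPyRun5_of_starts rest hs]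

-- ===== VERDICT (by name: the statement is the Claim_ definition above) =====
theorem is_max_4pys_spec : Claim_equal_is_max_4pys := by
  intro s _
  unfold Spec_is_max_4pys is_max_4pys is_max_4pys_alt
  by_cases h : s.toList.length ≤ 4
  · rw [if_pos h, hasPyRun5_short _ h]; rfl
  · rw [if_neg h, loop_inv _ 0 (by omega)]
    cases hs : startsPyRun s.toList 5 with
    | false => simp
    | true => simp [hasPyRun5_of_starts _ hs]
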